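-- pv_equiv track=rewrite | github.com/yrk06/Pybil | interpretador.py | registrador
-- ===== SOURCE A (Python) =====
-- def registrador(string):
--     if string[0] != '&':
--         return None, string
--     buffer = ""
--     final_idx = len(string)
--     for idx, c in enumerate(string[1:]):
--         if c in list(map(lambda a: str(a),range(10))):
--             buffer += c
--         else:
--             final_idx = idx+1
--             break
--     value = 0
--     try:
--         value = int(buffer)
--     except:
--         return None, string
--     if value >= 5:
--         return None, string
--     return value, string[final_idx:].strip()
-- ===== SOURCE B (Python) =====
-- def registrador(string):
--     if string[0] != '&':
--         return None, string
--     tail = string[1:].lstrip('0123456789')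
--     try:
--         value = int(string[1:len(string) - len(tail)])
--     except ValueError:
--         return None, string
--     if value >= 5:
--         return None, string
--     return value, tail.strip()
-- ===== Notes on version B (the rewrite author's own statement) =====
-- stated objective: simpler
-- what changed: Replaces A's enumerate/index digit-scanning loop (with its per-character rebuild of list(map(str, range(10))), buffer accumulation and break-index bookkeeping) by lstrip-based prefix arithmetic: the digit run is cut off in one lstrip call and its length recovered from the length difference, after which one slice and one strip finish the job.
import Mathlib
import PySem

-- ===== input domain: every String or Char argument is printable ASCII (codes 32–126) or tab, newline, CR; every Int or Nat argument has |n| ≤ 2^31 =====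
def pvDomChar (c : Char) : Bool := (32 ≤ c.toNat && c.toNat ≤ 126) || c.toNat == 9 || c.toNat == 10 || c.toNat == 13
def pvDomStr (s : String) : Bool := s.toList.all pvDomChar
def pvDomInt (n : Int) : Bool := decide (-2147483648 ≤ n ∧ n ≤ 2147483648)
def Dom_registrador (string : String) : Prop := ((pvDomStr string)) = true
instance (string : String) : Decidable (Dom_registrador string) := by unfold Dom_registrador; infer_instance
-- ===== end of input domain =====

-- B replaces A's manual enumerate/index digit-scanning loop with lstrip-based prefix arithmetic (objective: simpler).


-- ===== PORT A =====
-- list(map(lambda a: str(a), range(10)))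
def digitStrs : List String := (PySem.List.pyRange 0 10 1).map PySem.Int.toStr

-- the for-loop over enumerate(string[1:]): state (buffer, final_idx); 'break' returns early
def registradorLoop : List (Int × Char) → List Char → Int → List Char × Int
  | [], buffer, final_idx => (buffer, final_idx)
  | (idx, c) :: rest, buffer, final_idx =>
    if String.singleton c ∈ digitStrs then registradorLoop rest (buffer ++ [c]) final_idx
    else (buffer, idx + 1)

def registrador (string : String) : Option Int × String :=
  let s := string.toList
  match PySem.List.pyGet? s 0 with
  | none => (none, string)  -- string[0] raises IndexError on the empty string: excluded by Pre_
  | some c0 =>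
    if c0 ≠ '&' then (none, string)
    else
      match registradorLoop (PySem.List.enumerate (PySem.List.slice s (some 1) none)) [] (s.length : Int) with
      | (buffer, final_idx) =>
        match PySem.Int.ofChars? buffer with     -- int(buffer); ValueError → except branch
        | none => (none, string)
        | some value =>
          if value ≥ 5 then (none, string)
          else (some value, String.ofList (PySem.Chars.strip (PySem.List.slice s (some final_idx) none)))

-- ===== PORT B =====
def registrador_alt (string : String) : Option Int × String :=
  let s := string.toList
  match PySem.List.pyGet? s 0 with
  | none => (none, string)  -- string[0] raises IndexError on the empty string: excluded by Pre_
  | some c0 =>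
    if c0 ≠ '&' then (none, string)
    else
      -- string[1:].lstrip('0123456789'): drop all leading characters belonging to the digit set (exact for these ASCII chars)
      let tail := (PySem.List.slice s (some 1) none).dropWhile (fun c => c ∈ ['0','1','2','3','4','5','6','7','8','9'])
      match PySem.Int.ofChars? (PySem.List.slice s (some 1) (some ((s.length : Int) - (tail.length : Int)))) with
      | none => (none, string)   -- int(...) raises ValueError → except branch
      | some value =>
        if value ≥ 5 then (none, string)
        else (some value, String.ofList (PySem.Chars.strip tail))

-- ===== PRECONDITION & SPEC =====
-- Pre_ excludes only the empty string, on which A raises IndexError at string[0].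
def Pre_registrador (string : String) : Prop := string ≠ ""
instance (string : String) : Decidable (Pre_registrador string) := by unfold Pre_registrador; infer_instance
def pvWitness_registrador : String := "&3 abc"

def Spec_registrador (string : String) (out : Option Int × String) : Prop := out = registrador_alt string
instance (string : String) (out : Option Int × String) : Decidable (Spec_registrador string out) := by unfold Spec_registrador; infer_instance

-- ===== CLAIM (what is proved, stated in full; the proofs are below) =====
def Claim_equal_registrador : Prop := ∀ (string : String), Dom_registrador string → Pre_registrador string → Spec_registrador string (registrador string)

-- ===== LEMMAS AND PROOFS =====
def isDig (c : Char) : Bool := c ∈ ['0','1','2','3','4','5','6','7','8','9']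

theorem mem_digitStrs (c : Char) : (String.singleton c ∈ digitStrs) ↔ isDig c = true := by
  have h : digitStrs = ["0","1","2","3","4","5","6","7","8","9"] := by decide
  simp [h, isDig, String.singleton, String.ext_iff]

theorem loop_eq (rest : List Char) (k : Int) (buf : List Char) (fin : Int) :
    registradorLoop (PySem.List.enumerate rest k) buf fin =
      (buf ++ rest.takeWhile isDig,
       if rest.dropWhile isDig = [] then fin else k + (rest.takeWhile isDig).length + 1) := by
  induction rest generalizing k buf with
  | nil => simp [PySem.List.enumerate_nil, registradorLoop]
  | cons c t ih =>
    rw [PySem.List.enumerate_cons]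
    by_cases hc : isDig c = true
    · have hm : String.singleton c ∈ digitStrs := (mem_digitStrs c).mpr hc
      simp only [registradorLoop, if_pos hm, ih, List.takeWhile_cons, List.dropWhile_cons, hc,
        if_true, List.append_assoc, List.singleton_append, List.length_cons, Prod.mk.injEq]
      refine ⟨trivial, ?_⟩
      split
      · rfl
      · push_cast; ring
    · have hm : ¬ String.singleton c ∈ digitStrs := fun h => hc ((mem_digitStrs c).mp h)
      have hc' : isDig c = false := by simpa using hc
      simp [registradorLoop, if_neg hm, hc']

theorem take_takeWhile_len {α : Type} (p : α → Bool) (l : List α) :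
    l.take (l.takeWhile p).length = l.takeWhile p := by
  induction l with
  | nil => rfl
  | cons a t ih =>
    by_cases h : p a = true
    · simp [h, ih]
    · simp [h]

theorem drop_takeWhile_len {α : Type} (p : α → Bool) (l : List α) :
    l.drop (l.takeWhile p).length = l.dropWhile p := by
  induction l with
  | nil => rfl
  | cons a t ih =>
    by_cases h : p a = true
    · simp [h, ih]
    · simp [h]

-- ===== VERDICT (by name: the statement is the Claim_ definition above) =====
theorem registrador_spec : Claim_equal_registrador := by
  intro string _ hpre
  unfold Spec_registrador registrador registrador_alt
  cases hs : string.toList with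
  | nil => exact absurd (by simpa using congrArg String.ofList hs) hpre
  | cons c0 t =>
    dsimp only
    have hget : PySem.List.pyGet? (c0 :: t) (0 : Int) = some c0 := by
      simp [PySem.List.pyGet?, PySem.List.pyIdx?]
    rw [hget]
    by_cases hc0 : c0 = '&'
    · subst hc0
      simp only [ne_eq, not_true_eq_false, if_false]
      have hslice1 : PySem.List.slice ('&' :: t) (some (1 : Int)) none = t := by
        have := PySem.List.slice_from_natCast (xs := ('&' :: t)) (a := 1)
        simpa using this
      rw [hslice1, loop_eq]
      have hfun : (fun c : Char => decide (c ∈ ['0','1','2','3','4','5','6','7','8','9'])) = isDig := rfl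
      rw [hfun]
      have hsplit : t.takeWhile isDig ++ t.dropWhile isDig = t := List.takeWhile_append_dropWhile
      have hlen : t.length = (t.takeWhile isDig).length + (t.dropWhile isDig).length := by
        have h := congrArg List.length hsplit
        simp only [List.length_append] at h
        omega
      have hbound : ((('&' :: t).length : Nat) : Int) - ((t.dropWhile isDig).length : Int)
          = ((1 + (t.takeWhile isDig).length : Nat) : Int) := by
        simp only [List.length_cons, hlen]; push_cast; ring
      rw [hbound]
      have hsliceB : PySem.List.slice ('&' :: t) (some (1 : Int))
          (some ((1 + (t.takeWhile isDig).length : Nat) : Int)) = t.takeWhile isDig := by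
        rw [show (1 : Int) = ((1 : Nat) : Int) by simp, PySem.List.slice_natCast]
        simp [take_takeWhile_len]
      rw [hsliceB]
      simp only [List.nil_append]
      have hsliceF : PySem.List.slice ('&' :: t)
          (some (if t.dropWhile isDig = [] then ((('&' :: t).length : Nat) : Int)
                 else (0 : Int) + ((t.takeWhile isDig).length : Int) + 1)) none = t.dropWhile isDig := by
        by_cases hdwe : t.dropWhile isDig = []
        · rw [if_pos hdwe, PySem.List.slice_from_natCast]
          simp [hdwe]
        · rw [if_neg hdwe]
          have h1 : (0 : Int) + ((t.takeWhile isDig).length : Int) + 1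
              = (((t.takeWhile isDig).length + 1 : Nat) : Int) := by push_cast; ring
          rw [h1, PySem.List.slice_from_natCast]
          have h2 : ('&' :: t).drop ((t.takeWhile isDig).length + 1) = t.drop (t.takeWhile isDig).length := by
            simp
          rw [h2, drop_takeWhile_len]
      rw [hsliceF]
    · simp [hc0]
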